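-- pv_equiv track=rewrite | github.com/DancingOnAir/LeetcodePythonSolution | segment_tree/BinaryIndexTree/3072_distribute_elements_into_two_arrays_ii.py | resultArray
-- ===== SOURCE A (Python) =====
-- from typing import List
-- from bisect import bisect_left
--
-- class Fenwick:
--     def __init__(self, n):
--         self.tree = [0] * n
--
--     # 把下标为i的元素个数+1
--     def add(self, i):
--         while i < len(self.tree):
--             self.tree[i] += 1
--             i += i & -i
--
--     # 计算下标在[1, i]的元素个数之和
--     def query(self, i):
--         res = 0
--         while i > 0:
--             res += self.tree[i]
--             i -= i & -i
--         return res
--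
-- def resultArray(nums: List[int]) -> List[int]:
--     sorted_nums = sorted(set(nums))
--     n = len(sorted_nums)
--     t1, t2 = Fenwick(n + 1), Fenwick(n + 1)
--     t1.add(bisect_left(sorted_nums, nums[0]) + 1)
--     t2.add(bisect_left(sorted_nums, nums[1]) + 1)
--     arr1, arr2 = [nums[0]], [nums[1]]
--
--     for x in nums[2:]:
--         v = bisect_left(sorted_nums, x) + 1
--         # 分别计算arr中大于v的元素个数
--         cnt1 = len(arr1) - t1.query(v)
--         cnt2 = len(arr2) - t2.query(v)
--
--         if cnt1 > cnt2 or (cnt1 == cnt2 and len(arr1) <= len(arr2)):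
--             arr1.append(x)
--             t1.add(v)
--         else:
--             arr2.append(x)
--             t2.add(v)
--
--     return arr1 + arr2
-- ===== SOURCE B (Python) =====
-- from typing import List
-- from bisect import bisect_right, insort
--
--
-- def resultArray(nums: List[int]) -> List[int]:
--     arr1, arr2 = [nums[0]], [nums[1]]
--     sl1, sl2 = [nums[0]], [nums[1]]  # sorted copies of arr1 / arr2
--     for x in nums[2:]:
--         cnt1 = len(sl1) - bisect_right(sl1, x)
--         cnt2 = len(sl2) - bisect_right(sl2, x)
--         if cnt1 > cnt2 or (cnt1 == cnt2 and len(arr1) <= len(arr2)):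
--             arr1.append(x)
--             insort(sl1, x)
--         else:
--             arr2.append(x)
--             insort(sl2, x)
--     return arr1 + arr2
-- ===== Notes on version B (the rewrite author's own statement) =====
-- stated objective: simpler
-- what changed: Replaced the two Fenwick (binary-indexed) trees over coordinate-compressed values by two plain sorted lists of the actual values, so the greater-count query becomes len(sl) - bisect_right(sl, x) and the update a bisect.insort, with no compression step at all.
-- outside the precondition, e.g. on resultArray([0]): A raises IndexError, B raises IndexError; on resultArray([]): A raises IndexError, B raises IndexError; on resultArray([1]): A raises IndexError, B raises IndexError
import Mathlib
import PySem

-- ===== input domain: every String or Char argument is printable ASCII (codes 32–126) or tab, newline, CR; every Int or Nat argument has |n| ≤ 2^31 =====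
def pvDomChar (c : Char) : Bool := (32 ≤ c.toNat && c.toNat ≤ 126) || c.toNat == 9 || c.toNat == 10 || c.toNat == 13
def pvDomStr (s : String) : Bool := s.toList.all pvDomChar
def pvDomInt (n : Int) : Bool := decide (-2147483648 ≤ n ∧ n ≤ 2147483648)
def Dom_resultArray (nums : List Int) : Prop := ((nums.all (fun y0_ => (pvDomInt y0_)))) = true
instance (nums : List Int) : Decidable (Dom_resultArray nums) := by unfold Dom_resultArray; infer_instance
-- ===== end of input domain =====

-- B replaces A's two Fenwick trees over coordinate-compressed values by two sorted lists of the
-- actual values queried with bisect_right (objective: simpler; same return value, no mutation visible to the caller).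

-- ===== PORT A =====

-- i & -i, the lowbit step of both Fenwick while-loops
def lowb (i : Int) : Int := PySem.Int.band i (-i)

-- Fenwick.add: 'while i < len(tree): tree[i] += 1; i += i & -i'  (fuel only makes the loop total;
-- tree.length fuel always suffices here since i starts ≥ 1 and strictly increases each iteration)
def fenAdd : Nat → List Int → Int → List Int
  | 0, tree, _ => tree
  | fuel+1, tree, i =>
    if i < (tree.length : Int) then
      fenAdd fuel (tree.set i.toNat (tree.getD i.toNat 0 + 1)) (i + lowb i)
    else tree

-- Fenwick.query: 'res = 0; while i > 0: res += tree[i]; i -= i & -i'  (fuel i.toNat suffices: i decreases)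
def fenQuery : Nat → List Int → Int → Int
  | 0, _, _ => 0
  | fuel+1, tree, i =>
    if 0 < i then tree.getD i.toNat 0 + fenQuery fuel tree (i - lowb i) else 0

-- the body of A's 'for x in nums[2:]' loop; state = (arr1, arr2, t1.tree, t2.tree)
def stepA (sortedNums : List Int) (st : List Int × List Int × List Int × List Int) (x : Int) :
    List Int × List Int × List Int × List Int :=
  let (arr1, arr2, t1, t2) := st
  let v : Int := (PySem.List.bisectLeft sortedNums x : Int) + 1
  let cnt1 := (arr1.length : Int) - fenQuery v.toNat t1 v
  let cnt2 := (arr2.length : Int) - fenQuery v.toNat t2 v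
  if cnt1 > cnt2 ∨ (cnt1 = cnt2 ∧ (arr1.length : Int) ≤ (arr2.length : Int)) then
    (arr1 ++ [x], arr2, fenAdd t1.length t1 v, t2)
  else
    (arr1, arr2 ++ [x], t1, fenAdd t2.length t2 v)

def resultArray (nums : List Int) : List Int :=
  match nums with
  | x0 :: x1 :: rest =>
    let sortedNums := PySem.List.sorted (PySem.Set.ofList nums) (fun x => x) false
    let n := sortedNums.length
    let t1 := fenAdd (n+1) (List.replicate (n+1) 0) ((PySem.List.bisectLeft sortedNums x0 : Int) + 1)
    let t2 := fenAdd (n+1) (List.replicate (n+1) 0) ((PySem.List.bisectLeft sortedNums x1 : Int) + 1)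
    let s := rest.foldl (stepA sortedNums) ([x0], [x1], t1, t2)
    s.1 ++ s.2.1
  | _ => []   -- nums[0] / nums[1] raise IndexError: excluded by Pre_resultArray

-- ===== PORT B =====

-- bisect.insort sl x = sl[:bisect_right(sl, x)] + [x] + sl[bisect_right(sl, x):]
def insortR (sl : List Int) (x : Int) : List Int :=
  let j := PySem.List.bisectRight sl x
  sl.take j ++ x :: sl.drop j

-- the body of B's loop; state = (arr1, arr2, sl1, sl2)
def stepB (st : List Int × List Int × List Int × List Int) (x : Int) :
    List Int × List Int × List Int × List Int :=
  let (arr1, arr2, sl1, sl2) := st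
  let cnt1 := (sl1.length : Int) - (PySem.List.bisectRight sl1 x : Int)
  let cnt2 := (sl2.length : Int) - (PySem.List.bisectRight sl2 x : Int)
  if cnt1 > cnt2 ∨ (cnt1 = cnt2 ∧ (arr1.length : Int) ≤ (arr2.length : Int)) then
    (arr1 ++ [x], arr2, insortR sl1 x, sl2)
  else
    (arr1, arr2 ++ [x], sl1, insortR sl2 x)

def resultArray_alt (nums : List Int) : List Int :=
  match nums with
  | x0 :: x1 :: rest =>
    let s := rest.foldl stepB ([x0], [x1], [x0], [x1])
    s.1 ++ s.2.1
  | [] => []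
  | [_] => []

-- ===== PRECONDITION & SPEC =====
-- Pre_ excludes lists of fewer than two elements, where A raises IndexError on nums[0] / nums[1].
def Pre_resultArray (nums : List Int) : Prop := 2 ≤ nums.length
instance (nums : List Int) : Decidable (Pre_resultArray nums) := by unfold Pre_resultArray; infer_instance
def pvWitness_resultArray : List Int := [2, 1, 3, 3]
def Spec_resultArray (nums : List Int) (out : List Int) : Prop := out = resultArray_alt nums
instance (nums : List Int) (out : List Int) : Decidable (Spec_resultArray nums out) := by unfold Spec_resultArray; infer_instance

-- ===== CLAIM (what is proved, stated in full; the proofs are below) =====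
def Claim_equal_resultArray : Prop := ∀ (nums : List Int), Dom_resultArray nums → Pre_resultArray nums → Spec_resultArray nums (resultArray nums)

-- ===== LEMMAS AND PROOFS =====

-- ---- lowbit: number theory of i & -i ----
def lbN (n : Nat) : Nat := if n = 0 then 0 else 2 ^ (n.factorization 2)

theorem lbN_pos {n : Nat} (h : 0 < n) : 0 < lbN n := by
  rw [lbN, if_neg (by omega)]; positivity

theorem lbN_dvd (n : Nat) : lbN n ∣ n := by
  rcases Nat.eq_zero_or_pos n with h | h
  · simp [h]
  · rw [lbN, if_neg (by omega)]; exact Nat.ordProj_dvd n 2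

theorem lbN_le {n : Nat} (h : 0 < n) : lbN n ≤ n := Nat.le_of_dvd h (lbN_dvd n)

theorem pow2_dvd_lbN {e n : Nat} (hd : 2^e ∣ n) (h : 0 < n) : 2^e ∣ lbN n := by
  rw [lbN, if_neg (by omega)]
  exact pow_dvd_pow 2 ((Nat.Prime.pow_dvd_iff_le_factorization Nat.prime_two (by omega)).mp hd)

theorem lbN_pow2 {n : Nat} (h : 0 < n) : ∃ e, lbN n = 2^e :=
  ⟨n.factorization 2, by rw [lbN, if_neg (by omega)]⟩

theorem two_lbN_dvd (n : Nat) : 2 * lbN n ∣ (n - lbN n) := by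
  rcases Nat.eq_zero_or_pos n with h | h
  · simp [h]
  · have hsplit := Nat.ordProj_mul_ordCompl_eq_self n 2
    have hodd : ¬ 2 ∣ (n / 2 ^ n.factorization 2) := Nat.not_dvd_ordCompl Nat.prime_two (by omega)
    have hq : 0 < n / 2 ^ n.factorization 2 := Nat.ordCompl_pos 2 (by omega)
    rw [lbN, if_neg (by omega)]
    have heq : n - 2 ^ n.factorization 2 = 2 ^ n.factorization 2 * (n / 2 ^ n.factorization 2 - 1) := by
      rw [Nat.mul_sub, hsplit]; omega
    rw [heq]
    have h2 : 2 ∣ (n / 2 ^ n.factorization 2 - 1) := by omega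
    obtain ⟨c, hc⟩ := h2
    exact ⟨c, by rw [hc]; ring⟩

theorem lbN_dvd_lbN_of_le {a b : Nat} (ha : 0 < a) (hb : 0 < b) (h : lbN a ≤ lbN b) :
    lbN a ∣ lbN b := by
  obtain ⟨e, he⟩ := lbN_pow2 ha
  obtain ⟨f, hf⟩ := lbN_pow2 hb
  rw [he, hf] at h ⊢
  exact pow_dvd_pow 2 ((Nat.pow_le_pow_iff_right (by norm_num)).mp h)

theorem land_bit (a b x y : Nat) (hx : x < 2) (hy : y < 2) :
    (2*a + x) &&& (2*b + y) = 2*(a &&& b) + (x &&& y) := by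
  apply Nat.eq_of_testBit_eq
  intro i
  have h3 : x &&& y < 2 := by interval_cases x <;> interval_cases y <;> decide
  have h1 : (2*a + x) / 2 = a := by omega
  have h4 : (2*b + y) / 2 = b := by omega
  have h2 : (2*(a &&& b) + (x &&& y)) / 2 = a &&& b := by omega
  cases i with
  | zero =>
    rw [Nat.testBit_land, Nat.testBit_zero, Nat.testBit_zero, Nat.testBit_zero]
    have e1 : (2*a + x) % 2 = x := by omega
    have e2 : (2*b + y) % 2 = y := by omega
    have e4 : (2*(a &&& b) + (x &&& y)) % 2 = x &&& y := by omega
    rw [e1, e2, e4]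
    interval_cases x <;> interval_cases y <;> decide
  | succ i =>
    rw [Nat.testBit_succ, Nat.testBit_succ, Nat.and_div_two, h1, h4, h2]

theorem lbN_odd {n : Nat} (h : n % 2 = 1) : lbN n = 1 := by
  rw [lbN, if_neg (by omega), Nat.factorization_eq_zero_of_not_dvd (by omega), pow_zero]

theorem lbN_two_mul {t : Nat} (ht : 0 < t) : lbN (2 * t) = 2 * lbN t := by
  rw [lbN, lbN, if_neg (by omega), if_neg (by omega)]
  rw [Nat.factorization_mul (by norm_num) (by omega)]
  simp [Nat.Prime.factorization Nat.prime_two]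
  ring

theorem landLow : ∀ n : Nat, 0 < n → n &&& (n - 1) = n - lbN n := by
  intro n
  induction n using Nat.strong_induction_on with
  | _ n ih =>
    intro hn
    rcases Nat.even_or_odd n with he | ho
    · obtain ⟨t, ht⟩ := he
      have ht2 : n = 2 * t := by omega
      have htpos : 0 < t := by omega
      subst ht2
      have h1 : 2 * t - 1 = 2*(t-1) + 1 := by omega
      have hkey : 2*t &&& (2*(t-1) + 1) = 2*(t &&& (t-1)) := by
        simpa using land_bit t (t-1) 0 1 (by omega) (by omega)
      rw [h1, hkey, ih t (by omega) htpos, lbN_two_mul htpos]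
      have := lbN_le htpos
      omega
    · have h : n % 2 = 1 := Nat.odd_iff.mp ho
      have h1 : n &&& (n-1) = (2 * (n/2) + 1) &&& (2 * (n/2) + 0) := by
        congr 1 <;> omega
      rw [lbN_odd h, h1, land_bit _ _ 1 0 (by omega) (by omega)]
      simp
      omega

theorem lowb_natCast {k : Nat} (hk : 0 < k) : lowb (k : Int) = (lbN k : Int) := by
  have h0 : ¬ (0 ≤ -(k:Int)) := by omega
  rw [lowb, PySem.Int.band, if_pos (by omega), if_neg h0]
  have h1 : (-(-(k:Int)) - 1).toNat = k - 1 := by omega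
  have h2 : ((k:Int)).toNat = k := by omega
  rw [h1, h2, landLow k hk]
  have := lbN_le hk
  omega

-- ---- the add-loop path and its interval characterisation ----
def ascList : Nat → Nat → Nat → List Nat
  | 0, _, _ => []
  | fuel+1, k, len => if k < len then k :: ascList fuel (k + lbN k) len else []

theorem mem_ascList_ge {fuel k len j : Nat} (h : j ∈ ascList fuel k len) : k ≤ j := by
  induction fuel generalizing k with
  | zero => simp [ascList] at h
  | succ fuel ih =>
    rw [ascList] at h
    split at h
    · rcases List.mem_cons.mp h with h | h
      · omega
      · have := ih h; omega
    · simp at h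

theorem asc_step_le {k j : Nat} (hk : 0 < k) (hj : 0 < j) (hlt : k < j) (hin : j - lbN j < k) :
    k + lbN k ≤ j := by
  by_contra hcon
  push Not at hcon
  have ha : lbN k ∣ k := lbN_dvd k
  have hd : lbN j ∣ j := lbN_dvd j
  rcases le_or_gt (lbN k) (lbN j) with hle | hlt2
  · have h1 : lbN k ∣ lbN j := lbN_dvd_lbN_of_le hk hj hle
    have h2 : lbN k ∣ (j - k) := (Nat.dvd_sub (h1.trans hd) ha)
    have h3 : 0 < j - k := by omega
    have := Nat.le_of_dvd h3 h2
    omega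
  · have h1 : lbN j ∣ lbN k := lbN_dvd_lbN_of_le hj hk (by omega)
    have h2 : lbN j ∣ (j - k) := Nat.dvd_sub hd (h1.trans ha)
    have h3 : 0 < j - k := by omega
    have h4 : j - k < lbN j := by omega
    have := Nat.le_of_dvd h3 h2
    omega

theorem asc_interval {k j : Nat} (hk : 0 < k) (hj : 0 < j)
    (h1 : j - lbN j < k + lbN k) (h2 : k + lbN k ≤ j) : j - lbN j < k := by
  by_contra hcon
  push Not at hcon
  set H := j - lbN j with hH
  have hdvdH : 2 * lbN j ∣ H := two_lbN_dvd j
  have hlbj : 0 < lbN j := lbN_pos hj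
  have hlbk : 0 < lbN k := lbN_pos hk
  have hlbjle : lbN j ≤ j := lbN_le hj
  have ha : lbN k ∣ k := lbN_dvd k
  rcases eq_or_lt_of_le hcon with heq | hlt
  · have hdk : 2 * lbN j ∣ k := by rw [heq]; exact hdvdH
    obtain ⟨e, he⟩ := lbN_pow2 hj
    have hpow : 2 * lbN j = 2^(e+1) := by rw [he]; ring
    have hdl : 2^(e+1) ∣ lbN k := pow2_dvd_lbN (by rw [← hpow]; exact hdk) hk
    have hle : 2 * lbN j ≤ lbN k := by rw [hpow]; exact Nat.le_of_dvd hlbk hdl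
    omega
  · obtain ⟨e, he⟩ := lbN_pow2 hj
    obtain ⟨f, hf⟩ := lbN_pow2 hk
    have hpow : 2 * lbN j = 2^(e+1) := by rw [he]; ring
    rcases le_or_gt (2 * lbN j) (lbN k) with hle | hgt
    · have hef : e + 1 ≤ f := by
        rw [hpow, hf] at hle
        exact (Nat.pow_le_pow_iff_right (by norm_num)).mp hle
      have hdvd1 : 2 * lbN j ∣ lbN k := by
        rw [hpow, hf]; exact pow_dvd_pow 2 hef
      have hdvdk : 2 * lbN j ∣ k := hdvd1.trans ha
      have hdvdHk : 2 * lbN j ∣ (H - k) := Nat.dvd_sub hdvdH hdvdk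
      have hlow : lbN k - lbN j ≤ H - k := by omega
      have hhigh : H - k < lbN k := by omega
      obtain ⟨c, hc⟩ := hdvdHk
      obtain ⟨m, hm⟩ := hdvd1
      have hcm : c < m := Nat.lt_of_mul_lt_mul_left (hm ▸ hc ▸ hhigh)
      have hm1 : m = (m - 1) + 1 := by omega
      have hZ : 2 * lbN j * m = 2 * lbN j * (m-1) + 2 * lbN j := by
        conv_lhs => rw [hm1]
        ring
      have hX : 2 * lbN j * c ≤ 2 * lbN j * (m-1) := Nat.mul_le_mul_left _ (by omega)
      omega
    · have hef : f ≤ e := by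
        rw [hpow, hf] at hgt
        have := (Nat.pow_lt_pow_iff_right (a := 2) (by norm_num)).mp hgt
        omega
      have hdvd1 : lbN k ∣ lbN j := by
        rw [he, hf]; exact pow_dvd_pow 2 hef
      have hdvdH2 : lbN k ∣ H := Nat.dvd_sub (hdvd1.trans (lbN_dvd j)) hdvd1
      have hdvdHk : lbN k ∣ (H - k) := Nat.dvd_sub hdvdH2 ha
      have h3 : 0 < H - k := by omega
      have := Nat.le_of_dvd h3 hdvdHk
      omega

theorem mem_ascList_iff {fuel k len j : Nat} (hk : 0 < k) (hfuel : len ≤ fuel + k) :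
    j ∈ ascList fuel k len ↔ (j < len ∧ j - lbN j < k ∧ k ≤ j) := by
  induction fuel generalizing k with
  | zero => simp [ascList]; omega
  | succ fuel ih =>
    have hlbk := lbN_pos hk
    rw [ascList]
    split
    · rw [List.mem_cons]
      constructor
      · rintro (rfl | hmem)
        · have := lbN_pos hk; omega
        · have hk' : 0 < k + lbN k := by omega
          have hmm := (ih hk' (by omega)).mp hmem
          have hj : 0 < j := by omega
          exact ⟨hmm.1, asc_interval hk hj hmm.2.1 hmm.2.2, by omega⟩
      · rintro ⟨hjlen, hint, hkj⟩
        rcases eq_or_lt_of_le hkj with rfl | hlt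
        · left; rfl
        · right
          have hj : 0 < j := by omega
          have hstep := asc_step_le hk hj hlt hint
          exact (ih (by omega) (by omega)).mpr ⟨hjlen, by omega, hstep⟩
    · constructor
      · intro h; simp at h
      · rintro ⟨hjlen, _, hkj⟩; omega

-- ---- Fenwick loops, characterised ----
theorem fenAdd_getD (fuel : Nat) : ∀ (t : List Int) (k : Nat), 0 < k →
    (fenAdd fuel t (k : Int)).length = t.length ∧
    ∀ j : Nat, (fenAdd fuel t (k : Int)).getD j 0 =
      t.getD j 0 + (if j ∈ ascList fuel k t.length then 1 else 0) := by
  induction fuel with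
  | zero => intro t k hk; simp [fenAdd, ascList]
  | succ fuel ih =>
    intro t k hk
    rw [fenAdd]
    by_cases hlt : (k:Int) < (t.length : Int)
    · rw [if_pos hlt]
      have hklen : k < t.length := by exact_mod_cast hlt
      have htoNat : ((k:Int)).toNat = k := by omega
      have hlb : (k:Int) + lowb (k:Int) = ((k + lbN k : Nat) : Int) := by
        rw [lowb_natCast hk]; push_cast; ring
      rw [htoNat, hlb]
      have hk' : 0 < k + lbN k := by have := lbN_pos hk; omega
      obtain ⟨hl, hg⟩ := ih (t.set k (t.getD k 0 + 1)) (k + lbN k) hk'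
      have hlen' : (t.set k (t.getD k 0 + 1)).length = t.length := by simp
      rw [hlen'] at hl hg
      refine ⟨hl, fun j => ?_⟩
      rw [hg j]
      have hset : (t.set k (t.getD k 0 + 1)).getD j 0 =
          t.getD j 0 + (if j = k then 1 else 0) := by
        rw [List.getD_eq_getElem?_getD, List.getD_eq_getElem?_getD, List.getElem?_set]
        by_cases hjk : j = k
        · subst hjk
          simp [hklen, List.getD_eq_getElem?_getD]
        · have hkj : ¬ k = j := fun h => hjk h.symm
          simp [hkj]
          exact hjk
      rw [hset]
      have hcons : ascList (fuel+1) k t.length = k :: ascList fuel (k + lbN k) t.length := by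
        rw [ascList, if_pos hklen]
      by_cases hjk : j = k
      · have hnot : j ∉ ascList fuel (k + lbN k) t.length := fun h => by
          have := mem_ascList_ge h
          have := lbN_pos hk
          omega
        simp [hcons, hjk]
        exact hjk ▸ hnot
      · simp [hcons, hjk]
    · rw [if_neg hlt]
      have hklen : ¬ k < t.length := by exact_mod_cast hlt
      refine ⟨rfl, fun j => ?_⟩
      rw [ascList, if_neg hklen]
      simp

theorem fenQuery_eq (fuel : Nat) : ∀ (t : List Int) (v : Nat) (S : Nat → Int), S 0 = 0 →
    (∀ j : Nat, 0 < j → j < t.length → t.getD j 0 = S j - S (j - lbN j)) →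
    v < t.length → v ≤ fuel → fenQuery fuel t (v : Int) = S v := by
  induction fuel with
  | zero =>
    intro t v S hS0 hinv hvlen hvf
    have hv0 : v = 0 := by omega
    subst hv0
    simpa [fenQuery] using hS0.symm
  | succ fuel ih =>
    intro t v S hS0 hinv hvlen hvf
    rw [fenQuery]
    by_cases hv : 0 < v
    · rw [if_pos (by exact_mod_cast hv)]
      have htoNat : ((v:Int)).toNat = v := by omega
      have hlble := lbN_le hv
      have hlbpos := lbN_pos hv
      have hlb : (v:Int) - lowb (v:Int) = ((v - lbN v : Nat) : Int) := by
        rw [lowb_natCast hv]; push_cast [hlble]; ring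
      rw [htoNat, hlb, ih t (v - lbN v) S hS0 hinv (by omega) (by omega), hinv v hv hvlen]
      ring
    · have hv0 : v = 0 := by omega
      subst hv0
      rw [if_neg (by norm_num)]
      exact hS0.symm

-- ---- bisect on sorted lists counts ----
theorem bisectRight_eq_countP (sl : List Int) (x : Int) (hs : sl.Pairwise (· ≤ ·)) :
    PySem.List.bisectRight sl x = sl.countP (fun y => decide (y ≤ x)) := by
  obtain ⟨hle, hlo, hhi⟩ := PySem.List.bisectRight_spec sl x hs
  set k := PySem.List.bisectRight sl x with hk
  conv_rhs => rw [← List.take_append_drop k sl]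
  rw [List.countP_append]
  have h1 : (sl.take k).countP (fun y => decide (y ≤ x)) = k := by
    have : (sl.take k).countP (fun y => decide (y ≤ x)) = (sl.take k).length := by
      rw [List.countP_eq_length]
      intro a ha
      rw [List.mem_take_iff_getElem] at ha
      obtain ⟨i, hi, rfl⟩ := ha
      simpa using hlo i (by omega) (by omega)
    rw [this, List.length_take]
    omega
  have h2 : (sl.drop k).countP (fun y => decide (y ≤ x)) = 0 := by
    rw [List.countP_eq_zero]
    intro a ha
    rw [List.mem_drop_iff_getElem] at ha
    obtain ⟨i, hi, rfl⟩ := ha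
    simpa using hhi (k + i) (by omega) (by omega)
  omega

theorem insortR_perm (sl : List Int) (x : Int) : (insortR sl x).Perm (x :: sl) := by
  unfold insortR
  refine List.perm_middle.trans ?_
  rw [List.take_append_drop]

theorem insortR_pairwise (sl : List Int) (x : Int) (hs : sl.Pairwise (· ≤ ·)) :
    (insortR sl x).Pairwise (· ≤ ·) := by
  obtain ⟨hle, hlo, hhi⟩ := PySem.List.bisectRight_spec sl x hs
  set k := PySem.List.bisectRight sl x with hk
  have htk : ∀ a ∈ sl.take k, a ≤ x := by
    intro a ha
    rw [List.mem_take_iff_getElem] at ha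
    obtain ⟨i, hi, rfl⟩ := ha
    simpa using hlo i (by omega) (by omega)
  have hdk : ∀ b ∈ sl.drop k, x < b := by
    intro b hb
    rw [List.mem_drop_iff_getElem] at hb
    obtain ⟨i, hi, rfl⟩ := hb
    simpa using hhi (k + i) (by omega) (by omega)
  unfold insortR
  rw [List.pairwise_append]
  refine ⟨hs.sublist (List.take_sublist _ _), ?_, ?_⟩
  · rw [List.pairwise_cons]
    exact ⟨fun b hb => le_of_lt (hdk b hb), hs.sublist (List.drop_sublist _ _)⟩
  · intro a ha b hb
    rcases List.mem_cons.mp hb with rfl | hb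
    · exact htk a ha
    · exact le_of_lt (lt_of_le_of_lt (htk a ha) (hdk b hb))

-- ---- coordinate compression ----
theorem idx_lt_length {L : List Int} {z : Int} (hpw : L.Pairwise (· ≤ ·)) (hz : z ∈ L) :
    PySem.List.bisectLeft L z < L.length := by
  obtain ⟨hle, hlo, hhi⟩ := PySem.List.bisectLeft_spec L z hpw
  obtain ⟨i, hi, rfl⟩ := List.mem_iff_getElem.mp hz
  by_contra hcon
  have hki : i < PySem.List.bisectLeft L L[i] := by omega
  exact absurd (hlo i hi hki) (by simp)

theorem idx_le_iff {L : List Int} {x y : Int} (hpw : L.Pairwise (· < ·)) (hy : y ∈ L) (hx : x ∈ L) :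
    PySem.List.bisectLeft L y ≤ PySem.List.bisectLeft L x ↔ y ≤ x := by
  have hpw' : L.Pairwise (· ≤ ·) := hpw.imp le_of_lt
  have hmono : ∀ u v : Int, u ∈ L → v ≤ u → PySem.List.bisectLeft L v ≤ PySem.List.bisectLeft L u := by
    intro u v hu hvu
    obtain ⟨hle1, hlo1, hhi1⟩ := PySem.List.bisectLeft_spec L v hpw'
    obtain ⟨hle2, hlo2, hhi2⟩ := PySem.List.bisectLeft_spec L u hpw'
    by_contra hcon
    push Not at hcon
    have hj : PySem.List.bisectLeft L u < L.length := lt_of_lt_of_le hcon hle1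
    have h1 := hlo1 _ hj hcon
    have h2 := hhi2 _ hj le_rfl
    omega
  have hstrict : ∀ u v : Int, u ∈ L → v ∈ L → u < v →
      PySem.List.bisectLeft L u < PySem.List.bisectLeft L v := by
    intro u v hu hv huv
    obtain ⟨hle1, hlo1, hhi1⟩ := PySem.List.bisectLeft_spec L u hpw'
    obtain ⟨hle2, hlo2, hhi2⟩ := PySem.List.bisectLeft_spec L v hpw'
    have hul : PySem.List.bisectLeft L u < L.length := idx_lt_length hpw' hu
    -- L[bisectLeft L u] = u
    obtain ⟨i, hi, rfl⟩ := List.mem_iff_getElem.mp hu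
    have hgei : PySem.List.bisectLeft L L[i] ≤ i := by
      by_contra hcon
      push Not at hcon
      exact absurd (hlo1 i hi hcon) (by simp)
    have hLu : L[PySem.List.bisectLeft L L[i]] = L[i] := by
      have h1 := hhi1 _ hul le_rfl
      have h2 : L[PySem.List.bisectLeft L L[i]] ≤ L[i] := by
        rcases eq_or_lt_of_le hgei with heq | hlt
        · simp only [heq]
          exact le_rfl
        · exact le_of_lt (List.pairwise_iff_getElem.mp hpw _ _ hul hi hlt)
      omega
    by_contra hcon
    push Not at hcon
    have := hhi2 _ hul hcon
    omega
  constructor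
  · intro h
    by_contra hcon
    push Not at hcon
    have := hstrict x y hx hy hcon
    omega
  · intro h
    exact hmono x y hx h

-- ---- the Fenwick invariant ----
def SInd (L arr : List Int) (t : Nat) : Int :=
  (arr.countP (fun y => decide (PySem.List.bisectLeft L y + 1 ≤ t)) : Int)

theorem countP_congr_mem {p q : Int → Bool} {l : List Int} (h : ∀ a ∈ l, p a = q a) :
    l.countP p = l.countP q := by
  induction l with
  | nil => rfl
  | cons a l ih =>
    rw [List.countP_cons, List.countP_cons, h a List.mem_cons_self,
      ih (fun b hb => h b (List.mem_cons_of_mem a hb))]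

def FenInv (L t arr : List Int) : Prop :=
  t.length = L.length + 1 ∧
  ∀ j : Nat, 0 < j → j < t.length → t.getD j 0 = SInd L arr j - SInd L arr (j - lbN j)

theorem FenInv_add {L t arr : List Int} {x : Int} (hinv : FenInv L t arr) (hx : x ∈ L)
    (hpw : L.Pairwise (· ≤ ·)) :
    FenInv L (fenAdd t.length t ((PySem.List.bisectLeft L x : Int) + 1)) (arr ++ [x]) := by
  obtain ⟨hlen, hginv⟩ := hinv
  have hk : 0 < PySem.List.bisectLeft L x + 1 := by omega
  have hkle : PySem.List.bisectLeft L x + 1 ≤ L.length := idx_lt_length hpw hx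
  have hcast : ((PySem.List.bisectLeft L x : Int) + 1) = ((PySem.List.bisectLeft L x + 1 : Nat) : Int) := by
    push_cast; ring
  rw [hcast]
  obtain ⟨hl, hg⟩ := fenAdd_getD t.length t (PySem.List.bisectLeft L x + 1) hk
  have hS : ∀ tt, SInd L (arr ++ [x]) tt
      = SInd L arr tt + (if PySem.List.bisectLeft L x + 1 ≤ tt then 1 else 0) := by
    intro tt
    simp only [SInd, List.countP_append, List.countP_singleton]
    by_cases h : PySem.List.bisectLeft L x + 1 ≤ tt <;> simp [h]
  refine ⟨by rw [hl, hlen], fun j hj0 hjlen => ?_⟩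
  rw [hl] at hjlen
  rw [hg j, hginv j hj0 hjlen, hS, hS]
  have hmem := mem_ascList_iff (fuel := t.length) (len := t.length) (j := j) hk (by omega)
  simp only [hmem]
  have hsub : j - lbN j ≤ j := Nat.sub_le _ _
  split_ifs <;> omega

theorem FenInv_init {L : List Int} {x : Int} (hx : x ∈ L) (hpw : L.Pairwise (· ≤ ·)) :
    FenInv L (fenAdd (L.length+1) (List.replicate (L.length+1) 0)
      ((PySem.List.bisectLeft L x : Int) + 1)) [x] := by
  have hbase : FenInv L (List.replicate (L.length+1) 0) [] := by
    refine ⟨by simp, fun j hj0 hjlen => ?_⟩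
    rw [List.getD_eq_getElem?_getD, List.getElem?_replicate,
      if_pos (by simpa using hjlen)]
    simp [SInd]
  have := FenInv_add hbase hx hpw
  simpa using this

theorem query_cnt {L t arr : List Int} {x : Int} (hinv : FenInv L t arr) (hx : x ∈ L)
    (hpw : L.Pairwise (· < ·)) (hmem : ∀ y ∈ arr, y ∈ L) :
    fenQuery ((PySem.List.bisectLeft L x : Int) + 1).toNat t ((PySem.List.bisectLeft L x : Int) + 1)
      = (arr.countP (fun y => decide (y ≤ x)) : Int) := by
  have hpw' : L.Pairwise (· ≤ ·) := hpw.imp le_of_lt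
  have hkle : PySem.List.bisectLeft L x + 1 ≤ L.length := idx_lt_length hpw' hx
  have htoNat : ((PySem.List.bisectLeft L x : Int) + 1).toNat = PySem.List.bisectLeft L x + 1 := by
    omega
  have hcast : ((PySem.List.bisectLeft L x : Int) + 1) = ((PySem.List.bisectLeft L x + 1 : Nat) : Int) := by
    push_cast; ring
  rw [htoNat, hcast,
    fenQuery_eq _ t (PySem.List.bisectLeft L x + 1) (SInd L arr) (by simp [SInd]) hinv.2
      (by rw [hinv.1]; omega) le_rfl]
  unfold SInd
  congr 1
  apply countP_congr_mem
  intro y hy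
  have := idx_le_iff hpw (hmem y hy) hx
  simp only [decide_eq_decide]
  omega

-- ---- main loop ----
theorem loop_eq (L : List Int) (hpw : L.Pairwise (· < ·)) :
    ∀ (rest arr1 arr2 t1 t2 sl1 sl2 : List Int),
    (∀ y ∈ rest, y ∈ L) → (∀ y ∈ arr1, y ∈ L) → (∀ y ∈ arr2, y ∈ L) →
    FenInv L t1 arr1 → FenInv L t2 arr2 →
    sl1.Perm arr1 → sl1.Pairwise (· ≤ ·) → sl2.Perm arr2 → sl2.Pairwise (· ≤ ·) →
    (rest.foldl (stepA L) (arr1, arr2, t1, t2)).1 = (rest.foldl stepB (arr1, arr2, sl1, sl2)).1 ∧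
    (rest.foldl (stepA L) (arr1, arr2, t1, t2)).2.1 = (rest.foldl stepB (arr1, arr2, sl1, sl2)).2.1 := by
  intro rest
  induction rest with
  | nil =>
    intro arr1 arr2 t1 t2 sl1 sl2 _ _ _ _ _ _ _ _ _
    exact ⟨rfl, rfl⟩
  | cons x rest ih =>
    intro arr1 arr2 t1 t2 sl1 sl2 hrest hm1 hm2 hinv1 hinv2 hp1 hs1 hp2 hs2
    have hxL : x ∈ L := hrest x List.mem_cons_self
    have hrest' : ∀ y ∈ rest, y ∈ L := fun y hy => hrest y (List.mem_cons_of_mem x hy)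
    have hpwle : L.Pairwise (· ≤ ·) := hpw.imp le_of_lt
    have hq1 := query_cnt hinv1 hxL hpw hm1
    have hq2 := query_cnt hinv2 hxL hpw hm2
    have hb1 : ((PySem.List.bisectRight sl1 x : Nat) : Int)
        = (arr1.countP (fun y => decide (y ≤ x)) : Int) := by
      rw [bisectRight_eq_countP sl1 x hs1, hp1.countP_eq]
    have hb2 : ((PySem.List.bisectRight sl2 x : Nat) : Int)
        = (arr2.countP (fun y => decide (y ≤ x)) : Int) := by
      rw [bisectRight_eq_countP sl2 x hs2, hp2.countP_eq]
    have hl1 : sl1.length = arr1.length := hp1.length_eq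
    have hl2 : sl2.length = arr2.length := hp2.length_eq
    have hA : stepA L (arr1, arr2, t1, t2) x =
        if ((arr1.length : Int) - (arr1.countP (fun y => decide (y ≤ x)) : Int)
              > (arr2.length : Int) - (arr2.countP (fun y => decide (y ≤ x)) : Int))
           ∨ ((arr1.length : Int) - (arr1.countP (fun y => decide (y ≤ x)) : Int)
              = (arr2.length : Int) - (arr2.countP (fun y => decide (y ≤ x)) : Int)
             ∧ (arr1.length : Int) ≤ (arr2.length : Int)) then
          (arr1 ++ [x], arr2, fenAdd t1.length t1 ((PySem.List.bisectLeft L x : Int) + 1), t2)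
        else
          (arr1, arr2 ++ [x], t1, fenAdd t2.length t2 ((PySem.List.bisectLeft L x : Int) + 1)) := by
      simp only [stepA]
      rw [hq1, hq2]
    have hB : stepB (arr1, arr2, sl1, sl2) x =
        if ((arr1.length : Int) - (arr1.countP (fun y => decide (y ≤ x)) : Int)
              > (arr2.length : Int) - (arr2.countP (fun y => decide (y ≤ x)) : Int))
           ∨ ((arr1.length : Int) - (arr1.countP (fun y => decide (y ≤ x)) : Int)
              = (arr2.length : Int) - (arr2.countP (fun y => decide (y ≤ x)) : Int)
             ∧ (arr1.length : Int) ≤ (arr2.length : Int)) then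
          (arr1 ++ [x], arr2, insortR sl1 x, sl2)
        else
          (arr1, arr2 ++ [x], sl1, insortR sl2 x) := by
      simp only [stepB]
      rw [hb1, hb2, hl1, hl2]
    rw [List.foldl_cons, List.foldl_cons, hA, hB]
    by_cases hc : ((arr1.length : Int) - (arr1.countP (fun y => decide (y ≤ x)) : Int)
              > (arr2.length : Int) - (arr2.countP (fun y => decide (y ≤ x)) : Int))
           ∨ ((arr1.length : Int) - (arr1.countP (fun y => decide (y ≤ x)) : Int)
              = (arr2.length : Int) - (arr2.countP (fun y => decide (y ≤ x)) : Int)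
             ∧ (arr1.length : Int) ≤ (arr2.length : Int))
    · rw [if_pos hc, if_pos hc]
      refine ih (arr1 ++ [x]) arr2 _ t2 (insortR sl1 x) sl2 hrest' ?_ hm2
        (FenInv_add hinv1 hxL hpwle) hinv2
        ((insortR_perm sl1 x).trans ((hp1.cons x).trans (List.perm_append_singleton x arr1).symm))
        (insortR_pairwise sl1 x hs1) hp2 hs2
      intro y hy
      rcases List.mem_append.mp hy with hy | hy
      · exact hm1 y hy
      · rw [List.mem_singleton.mp hy]; exact hxL
    · rw [if_neg hc, if_neg hc]
      refine ih arr1 (arr2 ++ [x]) t1 _ sl1 (insortR sl2 x) hrest' hm1 ?_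
        hinv1 (FenInv_add hinv2 hxL hpwle) hp1 hs1
        ((insortR_perm sl2 x).trans ((hp2.cons x).trans (List.perm_append_singleton x arr2).symm))
        (insortR_pairwise sl2 x hs2)
      intro y hy
      rcases List.mem_append.mp hy with hy | hy
      · exact hm2 y hy
      · rw [List.mem_singleton.mp hy]; exact hxL

-- ===== VERDICT (by name: the statement is the Claim_ definition above) =====
theorem resultArray_spec : Claim_equal_resultArray := by
  intro nums _ hpre
  unfold Spec_resultArray
  match nums, hpre with
  | x0 :: x1 :: rest, _ =>
    rw [resultArray, resultArray_alt]
    have hpw := PySem.List.sorted_ofList_pairwise_lt (x0 :: x1 :: rest)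
    have hpwle : (PySem.List.sorted (PySem.Set.ofList (x0 :: x1 :: rest)) (fun x => x) false).Pairwise (· ≤ ·) :=
      hpw.imp le_of_lt
    have hmemL : ∀ y ∈ (x0 :: x1 :: rest),
        y ∈ PySem.List.sorted (PySem.Set.ofList (x0 :: x1 :: rest)) (fun x => x) false := by
      intro y hy
      rw [PySem.List.mem_sorted, PySem.Set.mem_ofList]
      exact hy
    have h := loop_eq _ hpw rest [x0] [x1] _ _ [x0] [x1]
      (fun y hy => hmemL y (by simp [hy]))
      (fun y hy => hmemL y (by rw [List.mem_singleton.mp hy]; simp))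
      (fun y hy => hmemL y (by rw [List.mem_singleton.mp hy]; simp))
      (FenInv_init (hmemL x0 (by simp)) hpwle)
      (FenInv_init (hmemL x1 (by simp)) hpwle)
      (List.Perm.refl _) (by simp) (List.Perm.refl _) (by simp)
    rw [h.1, h.2]
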